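-- pv_equiv track=rewrite | github.com/polirritmico/codesignal_solutions | Python/isInformationConsistent.py | solution
-- ===== SOURCE A (Python) =====
-- def solution(evidences: list[list[int]]) -> bool:
--     for defendant in range(len(evidences[0])):
--         searching_first_testimony = True
--         for witness in range(len(evidences)):
--             current = evidences[witness][defendant]
--             if current == 0:
--                 continue
--             if searching_first_testimony:
--                 searching_first_testimony = False
--                 testimony = current
--             elif current != testimony:
--                 return False
--     return True
-- ===== SOURCE B (Python) =====
-- def solution(evidences: list[list[int]]) -> bool:
--     merged = [0] * len(evidences[0])
--     for row in evidences:
--         pairs = list(zip(merged, row))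
--         if any(m and v and m != v for m, v in pairs):
--             return False
--         merged = [v or m for m, v in pairs]
--     return True
-- ===== Notes on version B (the rewrite author's own statement) =====
-- stated objective: alternative
-- what changed: Replaced the column-major double loop with a sentinel flag by a row-major fold that zips each row into a running consolidated-testimony vector, reporting False when a row conflicts with the merged testimony so far.
-- outside the precondition, e.g. on solution([[7, 1], [1]]): A returns False, B returns False; on solution([[1, 1], [1]]): A raises IndexError, B returns True
import Mathlib
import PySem

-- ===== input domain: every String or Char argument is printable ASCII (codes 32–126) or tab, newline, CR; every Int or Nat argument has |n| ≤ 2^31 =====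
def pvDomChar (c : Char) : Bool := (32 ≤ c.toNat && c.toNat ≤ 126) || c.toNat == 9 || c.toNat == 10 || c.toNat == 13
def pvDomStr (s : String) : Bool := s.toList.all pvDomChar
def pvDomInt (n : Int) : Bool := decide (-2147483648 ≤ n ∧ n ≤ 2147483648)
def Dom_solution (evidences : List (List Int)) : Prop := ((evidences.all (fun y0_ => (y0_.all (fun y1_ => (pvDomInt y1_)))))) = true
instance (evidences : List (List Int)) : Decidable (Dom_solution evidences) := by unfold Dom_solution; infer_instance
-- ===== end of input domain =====

-- B replaces A's column-major double loop (sentinel flag, early return) by a row-major fold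
-- merging each row into a running consolidated-testimony vector (alternative, same cost).

-- ===== PORT A =====
-- inner 'for witness in range(len(evidences))' loop: structural recursion over the rows,
-- state = (searching_first_testimony, testimony); 'return False' propagates as false.
def solutionInner (d : Int) : List (List Int) → Bool → Int → Bool
  | [], _, _ => true
  | row :: rest, searching, testimony =>
    let current := (PySem.List.pyGet? row d).getD 0   -- in range under Pre_solution
    if current = 0 then solutionInner d rest searching testimony
    else if searching then solutionInner d rest false current
    else if current ≠ testimony then false
    else solutionInner d rest searching testimony

-- outer 'for defendant in range(len(evidences[0]))' loop with early return False
def solutionOuter (evidences : List (List Int)) : List Nat → Bool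
  | [] => true
  | d :: ds =>
    if solutionInner (d : Int) evidences true 0 then solutionOuter evidences ds else false

def solution (evidences : List (List Int)) : Bool :=
  solutionOuter evidences (List.range ((PySem.List.pyGet? evidences 0).getD []).length)

-- ===== PORT B =====
-- 'for row in evidences' with early return, state = merged
def solutionAltLoop : List (List Int) → List Int → Bool
  | [], _ => true
  | row :: rest, merged =>
    let pairs := merged.zip row
    if pairs.any (fun p => p.1 ≠ 0 && p.2 ≠ 0 && p.1 ≠ p.2) then false
    else solutionAltLoop rest (pairs.map (fun p => if p.2 ≠ 0 then p.2 else p.1))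

def solution_alt (evidences : List (List Int)) : Bool :=
  solutionAltLoop evidences (List.replicate ((PySem.List.pyGet? evidences 0).getD []).length 0)

-- ===== PRECONDITION & SPEC =====
-- Pre_ excludes the empty matrix, on which A raises IndexError at evidences[0], and ragged
-- matrices with a row shorter than row 0: there A either raises IndexError or happens to
-- return False early depending on where the first conflict sits (an accident of the scan
-- order), while B's zip silently truncates to the short row.
def Pre_solution (evidences : List (List Int)) : Prop :=
  evidences ≠ [] ∧ ∀ row ∈ evidences, (evidences.headD []).length ≤ row.length
instance (evidences : List (List Int)) : Decidable (Pre_solution evidences) := by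
  unfold Pre_solution; infer_instance

def pvWitness_solution : List (List Int) := [[1, 0], [0, 2]]

def Spec_solution (evidences : List (List Int)) (out : Bool) : Prop := out = solution_alt evidences
instance (evidences : List (List Int)) (out : Bool) : Decidable (Spec_solution evidences out) := by
  unfold Spec_solution; infer_instance

-- ===== CLAIM (what is proved, stated in full; the proofs are below) =====
def Claim_equal_solution : Prop := ∀ (evidences : List (List Int)), Dom_solution evidences → Pre_solution evidences → Spec_solution evidences (solution evidences)

-- ===== LEMMAS AND PROOFS =====

-- the column-d values as both ports read them (0-defaulted; in range under Pre_)
def colVals (rows : List (List Int)) (d : Int) : List Int :=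
  rows.map (fun row => (PySem.List.pyGet? row d).getD 0)

-- the common spec of a single column: all nonzero entries equal, seeded with testimony m
-- (m = 0 means still searching for the first testimony)
def okCol : Int → List Int → Bool
  | _, [] => true
  | m, v :: vs =>
    if m ≠ 0 && v ≠ 0 && m ≠ v then false
    else okCol (if v ≠ 0 then v else m) vs

-- ---- A side ----

-- A's inner loop after the first testimony t (t ≠ 0): every later nonzero value equals t
theorem inner_false (d : Int) (rows : List (List Int)) (t : Int) (ht : t ≠ 0) :
    solutionInner d rows false t = okCol t (colVals rows d) := by
  induction rows with
  | nil => rfl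
  | cons row rest ih =>
    simp only [solutionInner, colVals, List.map_cons, okCol]
    by_cases h0 : ((PySem.List.pyGet? row d).getD 0) = 0
    · simp [h0, ih, colVals]
    · by_cases hte : ((PySem.List.pyGet? row d).getD 0) = t
      · simp [hte, ht, ih, colVals]
      · simp [h0, ht, hte, Ne.symm hte]

-- A's inner loop from the start equals the column spec seeded with 0
theorem inner_true (d : Int) (rows : List (List Int)) (t0 : Int) :
    solutionInner d rows true t0 = okCol 0 (colVals rows d) := by
  induction rows generalizing t0 with
  | nil => rfl
  | cons row rest ih =>
    simp only [solutionInner, colVals, List.map_cons, okCol]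
    by_cases h0 : ((PySem.List.pyGet? row d).getD 0) = 0
    · simp [h0, ih, colVals]
    · simp [h0, inner_false _ _ _ h0, colVals]

-- A's early-return outer loop equals List.all of the column spec
theorem outer_eq (evidences : List (List Int)) (ds : List Nat) :
    solutionOuter evidences ds =
      ds.all (fun d => okCol 0 (colVals evidences (d : Int))) := by
  induction ds with
  | nil => rfl
  | cons d rest ih =>
    simp only [solutionOuter, List.all_cons]
    rw [← inner_true _ _ 0, ih]
    by_cases h : solutionInner (d : Int) evidences true 0 <;> simp [h]

-- ---- B side ----

-- congruence for List.all under a pointwise equality on members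
theorem pv_all_congr {α : Type} {l : List α} {f g : α → Bool}
    (h : ∀ x ∈ l, f x = g x) : l.all f = l.all g := by
  induction l with
  | nil => rfl
  | cons x xs ih =>
    simp only [List.all_cons, h x (by simp), ih (fun y hy => h y (by simp [hy]))]

-- B's row-major fold equals the per-column spec, provided every row covers merged's width
theorem altLoop_eq (rows : List (List Int)) (merged : List Int)
    (hlen : ∀ row ∈ rows, merged.length ≤ row.length) :
    solutionAltLoop rows merged =
      (List.range merged.length).all
        (fun d => okCol (merged.getD d 0) (colVals rows (d : Int))) := by
  induction rows generalizing merged with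
  | nil => simp [solutionAltLoop, colVals, okCol]
  | cons row rest ih =>
    have hrow : merged.length ≤ row.length := hlen row (by simp)
    have hzlen : (merged.zip row).length = merged.length := by
      simp [List.length_zip, Nat.min_eq_left hrow]
    have hval : ∀ (d : Nat) (hd : d < merged.length),
        (PySem.List.pyGet? row (d : Int)).getD 0 = row[d]'(lt_of_lt_of_le hd hrow) := by
      intro d hd
      simp [PySem.List.pyGet?_natCast, List.getElem?_eq_getElem (lt_of_lt_of_le hd hrow)]
    have hzip : ∀ (d : Nat) (hd : d < merged.length),
        (merged.zip row)[d]'(by omega) =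
          (merged[d]'hd, row[d]'(lt_of_lt_of_le hd hrow)) := by
      intro d hd; simp [List.getElem_zip]
    simp only [solutionAltLoop]
    by_cases hany :
        (merged.zip row).any (fun p => p.1 ≠ 0 && p.2 ≠ 0 && p.1 ≠ p.2) = true
    · rw [if_pos hany]
      obtain ⟨p, hp, hc⟩ := List.any_eq_true.mp hany
      obtain ⟨d, hd, hpd⟩ := List.mem_iff_getElem.mp hp
      rw [hzlen] at hd
      rw [hzip d hd] at hpd
      symm
      rw [List.all_eq_false]
      refine ⟨d, List.mem_range.mpr hd, ?_⟩
      simp only [colVals, List.map_cons, okCol, hval d hd,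
        List.getD_eq_getElem _ _ hd]
      subst hpd
      simp only [Bool.and_eq_true, decide_eq_true_eq] at hc
      simp only [decide_not]
      intro hcase
      simp [hc.1.1, hc.1.2, hc.2] at hcase
    · rw [if_neg hany]
      have hup : ∀ r ∈ rest,
          ((merged.zip row).map (fun p => if p.2 ≠ 0 then p.2 else p.1)).length ≤ r.length := by
        intro r hr
        rw [List.length_map, hzlen]
        exact hlen r (List.mem_cons_of_mem _ hr)
      rw [ih _ hup, List.length_map, hzlen]
      apply pv_all_congr
      intro d hdm
      have hd : d < merged.length := List.mem_range.mp hdm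
      have hnc := List.any_eq_false.mp (Bool.not_eq_true _ ▸ hany) _
        (List.getElem_mem (l := merged.zip row) (n := d) (by omega))
      rw [hzip d hd] at hnc
      simp only at hnc
      have hget : ((merged.zip row).map (fun p => if p.2 ≠ 0 then p.2 else p.1)).getD d 0 =
          (if row[d]'(lt_of_lt_of_le hd hrow) ≠ 0 then row[d]'(lt_of_lt_of_le hd hrow)
           else merged[d]'hd) := by
        rw [List.getD_eq_getElem _ _ (by simp [hzlen, hd])]
        rw [List.getElem_map, hzip d hd]
      rw [hget]
      simp only [Bool.and_eq_true, decide_eq_true_eq, not_and, Bool.not_eq_true,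
        ne_eq, Decidable.not_not] at hnc
      have hveq := hval d hd
      have hm? : merged[d]? = some (merged[d]'hd) := List.getElem?_eq_getElem hd
      have hr? : row[d]? = some (row[d]'(lt_of_lt_of_le hd hrow)) :=
        List.getElem?_eq_getElem (lt_of_lt_of_le hd hrow)
      by_cases hv : row[d]'(lt_of_lt_of_le hd hrow) = 0
      · simp [colVals, okCol, hveq, hv, hm?, hr?, List.getD_eq_getElem _ _ hd]
      · have hmv : merged[d]'hd = 0 ∨ merged[d]'hd = row[d]'(lt_of_lt_of_le hd hrow) := by
          by_cases hm : merged[d]'hd = 0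
          · exact Or.inl hm
          · exact Or.inr (hnc ⟨hm, hv⟩)
        cases hmv with
        | inl h => simp [colVals, okCol, hveq, hv, h, hm?, hr?, List.getD_eq_getElem _ _ hd]
        | inr h => simp [colVals, okCol, hveq, hv, h, hm?, hr?, List.getD_eq_getElem _ _ hd]

-- ===== VERDICT (by name: the statement is the Claim_ definition above) =====
theorem solution_spec : Claim_equal_solution := by
  intro evidences _ hpre
  obtain ⟨hne, hrows⟩ := hpre
  unfold Spec_solution solution solution_alt
  cases evidences with
  | nil => exact absurd rfl hne
  | cons h t =>
    have h0 : (PySem.List.pyGet? (h :: t) (0 : Int)).getD [] = h := by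
      simp [PySem.List.pyGet?, PySem.List.pyIdx?]
    rw [h0, outer_eq, altLoop_eq _ _ (by
      intro r hr
      simpa [List.length_replicate] using hrows r hr)]
    rw [List.length_replicate]
    apply pv_all_congr
    intro d _
    have : (List.replicate h.length (0 : Int)).getD d 0 = 0 := by
      simp [List.getD_eq_getElem?_getD, List.getElem?_replicate]
      split <;> rfl
    rw [this]
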